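-- pv_equiv track=rewrite | github.com/AEG2024/Numerology-Python-Project | numerology.py | calculate_expression_number
-- ===== SOURCE A (Python) =====
-- def sum_of_digits(num):
--     total = 0
--     for digit in str(num):
--         if digit.isdigit():  # Ensure we're only summing digits
--             total += int(digit)
--     return total
--
-- def reduce_to_single_digit(num):
--     while num > 9:
--         num = sum_of_digits(num)
--     return num
--
-- letter_to_number = {
--     "A": 1,
--     "B": 2,
--     "C": 3,
--     "D": 4,
--     "E": 5,
--     "F": 6,
--     "G": 7,
--     "H": 8,
--     "I": 9,
--     "J": 1,
--     "K": 2,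
--     "L": 3,
--     "M": 4,
--     "N": 5,
--     "O": 6,
--     "P": 7,
--     "Q": 8,
--     "R": 9,
--     "S": 1,
--     "T": 2,
--     "U": 3,
--     "V": 4,
--     "W": 5,
--     "X": 6,
--     "Y": 7,
--     "Z": 8,
-- }
--
-- def calculate_expression_number(full_name):
--     full_name = full_name.upper()
--     total = 0
--     for letter in full_name:
--         if (
--             letter.isalpha() and letter in letter_to_number
--         ):  # Ignore non-alphabet characters
--             total += letter_to_number[letter]
--     return reduce_to_single_digit(total)
-- ===== SOURCE B (Python) =====
-- def calculate_expression_number(full_name):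
--     total = sum((ord(c) - 65) % 9 + 1 for c in full_name.upper() if 'A' <= c <= 'Z')
--     return 0 if total == 0 else 1 + (total - 1) % 9
-- ===== Notes on version B (the rewrite author's own statement) =====
-- stated objective: simpler
-- what changed: Replaced the 26-entry lookup table by the arithmetic (ord(c)-65)%9+1 over A-Z and the iterated digit-sum reduction loop by the O(1) digital-root closed form 1+(total-1)%9 (0 when total is 0).
import Mathlib
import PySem

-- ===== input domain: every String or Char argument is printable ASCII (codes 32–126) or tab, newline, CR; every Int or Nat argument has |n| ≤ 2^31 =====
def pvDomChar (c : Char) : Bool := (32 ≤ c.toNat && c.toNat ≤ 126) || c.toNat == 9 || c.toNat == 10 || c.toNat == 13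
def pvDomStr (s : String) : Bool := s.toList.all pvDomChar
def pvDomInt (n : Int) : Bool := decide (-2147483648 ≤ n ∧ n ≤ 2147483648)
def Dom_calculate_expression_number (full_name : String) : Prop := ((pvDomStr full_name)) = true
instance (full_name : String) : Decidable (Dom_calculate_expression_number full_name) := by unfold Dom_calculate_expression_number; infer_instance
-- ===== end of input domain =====

-- B replaces A's letter table by the arithmetic (ord(c)-65)%9+1 and A's iterated
-- digit-sum reduction loop by the O(1) digital-root closed form (objective: simpler).

-- ===== PORT A =====
def sum_of_digits (num : Int) : Int :=
  (PySem.Int.toChars num).foldl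
    (fun total digit =>
      if PySem.Chars.isdigit digit then total + (PySem.Int.ofChars? [digit]).getD 0
      else total) 0

-- lemmas needed by reduce_to_single_digit's termination (cited in decreasing_by)
lemma toDigitsCore_eq_digits (f : Nat) : ∀ (n : Nat) (l : List Char), 0 < n → n ≤ f →
    Nat.toDigitsCore 10 f n l = ((Nat.digits 10 n).map Nat.digitChar).reverse ++ l := by
  induction f with
  | zero => intro n l hn hf; omega
  | succ f ih =>
    intro n l hn hf
    rw [Nat.toDigitsCore]
    by_cases h : n / 10 = 0
    · have hn10 : n < 10 := by omega
      rw [Nat.digits_def' (by norm_num : (1:Nat) < 10) hn, h, Nat.digits_zero,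
        Nat.mod_eq_of_lt hn10]
      simp
    · have h1 : 0 < n / 10 := Nat.pos_of_ne_zero h
      have h2 : n / 10 ≤ f := by
        have := Nat.div_lt_self hn (by norm_num : (1:Nat) < 10); omega
      rw [if_neg h, ih _ _ h1 h2, Nat.digits_def' (by norm_num : (1:Nat) < 10) hn]
      simp

lemma ofChars_digitChar (v : Nat) (hv : v < 10) :
    PySem.Chars.isdigit (Nat.digitChar v) = true ∧
      PySem.Int.ofChars? [Nat.digitChar v] = some (v : Int) := by
  interval_cases v <;> exact ⟨by decide, by decide⟩

lemma foldl_digit_step (ds : List Nat) (h : ∀ d ∈ ds, d < 10) : ∀ (t : Int),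
    (ds.map Nat.digitChar).foldl
      (fun total digit =>
        if PySem.Chars.isdigit digit then total + (PySem.Int.ofChars? [digit]).getD 0
        else total) t = t + ((ds.sum : Nat) : Int) := by
  induction ds with
  | nil => intro t; simp
  | cons d ds ih =>
    intro t
    have hd := ofChars_digitChar d (h d (by simp))
    rw [List.map_cons, List.foldl_cons, if_pos hd.1, hd.2, Option.getD_some,
      ih (fun x hx => h x (by simp [hx])), List.sum_cons]
    push_cast
    ring

lemma sum_of_digits_natCast (n : Nat) (hn : 0 < n) :
    sum_of_digits (n : Int) = (((Nat.digits 10 n).sum : Nat) : Int) := by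
  unfold sum_of_digits
  rw [show PySem.Int.toChars (n : Int) = Nat.toDigits 10 n by
        simp [PySem.Int.toChars, Int.toNat_natCast, show ¬((n:Int) < 0) by omega]]
  rw [Nat.toDigits, toDigitsCore_eq_digits (n + 1) n [] hn (by omega), List.append_nil,
    ← List.map_reverse]
  rw [foldl_digit_step ((Nat.digits 10 n).reverse)
    (fun d hd => Nat.digits_lt_base (by norm_num) (List.mem_reverse.mp hd))]
  rw [List.sum_reverse, zero_add]

lemma digitsum_lt (n : Nat) (h : 10 ≤ n) : (Nat.digits 10 n).sum < n := by
  rw [Nat.digits_def' (by norm_num : (1:Nat) < 10) (by omega)]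
  have h1 := Nat.digit_sum_le 10 (n / 10)
  have h2 := Nat.div_add_mod n 10
  have h3 : 1 ≤ n / 10 := by omega
  simp only [List.sum_cons]
  omega

lemma sum_of_digits_toNat_lt (num : Int) (h : 9 < num) :
    (sum_of_digits num).toNat < num.toNat := by
  have h0 : num = ((num.toNat : Nat) : Int) := by omega
  have h10 : 10 ≤ num.toNat := by omega
  have := digitsum_lt num.toNat h10
  rw [h0, sum_of_digits_natCast num.toNat (by omega)]
  omega

def reduce_to_single_digit (num : Int) : Int :=
  if h : 9 < num then reduce_to_single_digit (sum_of_digits num) else num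
termination_by num.toNat
decreasing_by exact sum_of_digits_toNat_lt num h

def letter_to_number : PySem.Dict Char Int := PySem.Dict.mk
  [('A', 1), ('B', 2), ('C', 3), ('D', 4), ('E', 5), ('F', 6), ('G', 7), ('H', 8),
   ('I', 9), ('J', 1), ('K', 2), ('L', 3), ('M', 4), ('N', 5), ('O', 6), ('P', 7),
   ('Q', 8), ('R', 9), ('S', 1), ('T', 2), ('U', 3), ('V', 4), ('W', 5), ('X', 6),
   ('Y', 7), ('Z', 8)]

def calculate_expression_number (full_name : String) : Int :=
  let full_name := PySem.Str.upper full_name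
  let total : Int := full_name.toList.foldl
    (fun total letter =>
      if PySem.Chars.isalpha letter && PySem.Dict.contains letter_to_number letter
      then total + (PySem.Dict.get? letter_to_number letter).getD 0
      else total) 0
  reduce_to_single_digit total

-- ===== PORT B =====
def calculate_expression_number_alt (full_name : String) : Int :=
  let total : Int :=
    (((PySem.Str.upper full_name).toList.filter
        (fun c => decide ('A' ≤ c) && decide (c ≤ 'Z'))).map
      (fun c => PySem.Int.mod ((c.toNat : Int) - 65) 9 + 1)).sum
  if total = 0 then 0 else 1 + PySem.Int.mod (total - 1) 9

-- ===== PRECONDITION & SPEC =====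
def Spec_calculate_expression_number (full_name : String) (out : Int) : Prop := out = calculate_expression_number_alt full_name
instance (full_name : String) (out : Int) : Decidable (Spec_calculate_expression_number full_name out) := by unfold Spec_calculate_expression_number; infer_instance

-- ===== CLAIM (what is proved, stated in full; the proofs are below) =====
def Claim_equal_calculate_expression_number : Prop := ∀ (full_name : String), Dom_calculate_expression_number full_name → Spec_calculate_expression_number full_name (calculate_expression_number full_name)

-- ===== LEMMAS AND PROOFS =====

-- A's per-letter branch equals B's per-letter branch, for every character.
lemma step_if_add_congr {c1 c2 : Prop} [Decidable c1] [Decidable c2] {acc a b : Int}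
    (h1 : c1) (h2 : c2) (hab : a = b) :
    (if c1 then acc + a else acc) = (if c2 then acc + b else acc) := by
  rw [if_pos h1, if_pos h2, hab]

lemma step_eq (acc : Int) (c : Char) :
    (if PySem.Chars.isalpha c && PySem.Dict.contains letter_to_number c
     then acc + (PySem.Dict.get? letter_to_number c).getD 0
     else acc)
    = (if (decide ('A' ≤ c) && decide (c ≤ 'Z')) = true
       then acc + (PySem.Int.mod ((c.toNat : Int) - 65) 9 + 1)
       else acc) := by
  by_cases h : ('A' ≤ c ∧ c ≤ 'Z')
  · have h65 : 65 ≤ c.toNat := h.1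
    have h90 : c.toNat ≤ 90 := h.2
    have hc : c = Char.ofNat c.toNat := (Char.ofNat_toNat c).symm
    rw [hc]
    set n := c.toNat with hn
    interval_cases n <;> exact step_if_add_congr (by decide) (by decide) (by decide)
  · have hB : ¬ ((decide ('A' ≤ c) && decide (c ≤ 'Z')) = true) := by simpa using h
    have hcon : PySem.Dict.contains letter_to_number c = false := by
      rw [PySem.Dict.contains]
      apply List.any_eq_false.mpr
      intro p hp
      fin_cases hp <;> (simp only [beq_iff_eq]; rintro rfl; exact h (by decide))
    rw [if_neg hB, if_neg (by simp [hcon])]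

-- digital root closed form for the reduce loop, on Nat inputs, by strong induction
lemma digitsum_pos (n : Nat) (h : 0 < n) : 0 < (Nat.digits 10 n).sum := by
  induction n using Nat.strong_induction_on with
  | _ n ih =>
    rw [Nat.digits_def' (by norm_num : (1:Nat) < 10) h, List.sum_cons]
    by_cases hm : n % 10 = 0
    · have h10 : 10 ≤ n := by omega
      have := ih (n / 10) (Nat.div_lt_self h (by norm_num)) (by omega)
      omega
    · omega

lemma digitsum_mod9 (n : Nat) : n % 9 = (Nat.digits 10 n).sum % 9 :=
  Nat.modEq_digits_sum 9 10 (by norm_num) n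

lemma reduce_nat (n : Nat) :
    reduce_to_single_digit (n : Int) =
      if (n : Int) = 0 then 0 else 1 + ((n : Int) - 1) % 9 := by
  induction n using Nat.strong_induction_on with
  | _ n ih =>
    rw [reduce_to_single_digit]
    by_cases h : 9 < (n : Int)
    · rw [dif_pos h]
      have h10 : 10 ≤ n := by omega
      rw [sum_of_digits_natCast n (by omega)]
      have hlt := digitsum_lt n h10
      have hpos := digitsum_pos n (by omega)
      have hmod := digitsum_mod9 n
      rw [ih _ hlt]
      have hs0 : ¬ ((((Nat.digits 10 n).sum : Nat) : Int) = 0) := by omega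
      rw [if_neg hs0, if_neg (by omega : ¬ (n : Int) = 0)]
      omega
    · rw [dif_neg h]
      by_cases h0 : (n : Int) = 0
      · rw [if_pos h0]; omega
      · rw [if_neg h0]; omega

lemma reduce_closed (T : Int) (hT : 0 ≤ T) :
    reduce_to_single_digit T = if T = 0 then 0 else 1 + PySem.Int.mod (T - 1) 9 := by
  rw [PySem.Int.mod_eq_emod_of_pos (by norm_num)]
  have : T = ((T.toNat : Nat) : Int) := by omega
  rw [this]
  exact reduce_nat T.toNat

-- ===== VERDICT (by name: the statement is the Claim_ definition above) =====
theorem calculate_expression_number_spec : Claim_equal_calculate_expression_number := by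
  intro full_name _
  unfold Spec_calculate_expression_number calculate_expression_number calculate_expression_number_alt
  dsimp only
  rw [PySem.List.foldl_congr_mem (PySem.Str.upper full_name).toList _
      (fun acc c =>
        if (decide ('A' ≤ c) && decide (c ≤ 'Z')) = true
        then acc + (PySem.Int.mod ((c.toNat : Int) - 65) 9 + 1)
        else acc) 0
      (fun acc x _ => step_eq acc x)]
  rw [PySem.List.foldl_if_eq_foldl_filter
      (fun c => decide ('A' ≤ c) && decide (c ≤ 'Z'))
      (fun acc c => acc + (PySem.Int.mod ((c.toNat : Int) - 65) 9 + 1)) _ 0]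
  rw [PySem.List.foldl_add _ (fun c : Char => PySem.Int.mod ((c.toNat : Int) - 65) 9 + 1) 0]
  rw [zero_add]
  apply reduce_closed
  apply List.sum_nonneg
  intro x hx
  simp only [List.mem_map] at hx
  rcases hx with ⟨c, -, rfl⟩
  have := PySem.Int.mod_nonneg ((c.toNat : Int) - 65) (b := 9) (by norm_num)
  omega
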